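-- pv_equiv track=rewrite | github.com/yanweiser/dynamic_form_filling | src/output_matching.py | remove_nl
-- ===== SOURCE A (Python) =====
-- def remove_nl(output):
--     in_str = False
--     for i in range(len(output)):
--         if output[i] == '"':
--             in_str = not in_str
--         if output[i] == "\n" and in_str:
--             output = output[:i] + "; " + output[i+1:]
--     return output
-- ===== SOURCE B (Python) =====
-- def remove_nl(output):
--     parts = []
--     in_str = False
--     for c in output:
--         if c == '"':
--             in_str = not in_str
--         if c == '\n' and in_str:
--             parts.append('; ')
--         else:
--             parts.append(c)
--     return ''.join(parts)
-- ===== Notes on version B (the rewrite author's own statement) =====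
-- stated objective: idiomatic
-- what changed: B is a single pass over the characters that appends either the character or the semicolon-space replacement to a result list and joins once, instead of rebuilding the whole string with slices at every replaced newline while indexing into the evolving string.
-- intended difference: On strings where some in-string newline at position j satisfies j + (number of earlier in-string newlines) >= len, A's fixed-length index loop never reaches that newline (each insertion shifts the tail right) and returns it unreplaced, while B replaces every in-string newline as the function evidently intends. — e.g. on remove_nl("\"\n\n"): A returns "\"; \n", B returns "\"; ; "
import Mathlib
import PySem

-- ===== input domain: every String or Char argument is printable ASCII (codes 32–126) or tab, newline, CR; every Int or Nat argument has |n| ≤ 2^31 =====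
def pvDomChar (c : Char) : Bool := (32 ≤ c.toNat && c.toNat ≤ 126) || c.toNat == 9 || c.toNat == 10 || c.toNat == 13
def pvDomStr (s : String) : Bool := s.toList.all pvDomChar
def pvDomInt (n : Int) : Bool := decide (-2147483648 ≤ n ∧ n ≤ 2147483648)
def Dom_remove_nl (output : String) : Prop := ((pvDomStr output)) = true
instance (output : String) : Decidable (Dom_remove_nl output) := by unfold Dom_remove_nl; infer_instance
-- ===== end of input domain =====

-- B replaces in-string newlines in one pass over the characters (list + join) instead of
-- rebuilding the string by slicing at each replacement; where A's fixed-length index loop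
-- misses trailing in-string newlines (D_ below), B replaces them as intended.

-- ===== PORT A =====
-- A's loop body: output[i] with 0 ≤ i < len(output at loop entry) ≤ current length
-- (the string only grows), so output[i] is s[i]? with a some result; the none branch
-- is unreachable and leaves the state unchanged. output[:i] = take i and
-- output[i+1:] = drop (i+1), exact for 0 ≤ i.
def stepA_remove (st : List Char × Bool) (i : Nat) : List Char × Bool :=
  let s := st.1
  let in_str := st.2
  match s[i]? with
  | none => (s, in_str)
  | some c =>
    let in_str := if c == '"' then !in_str else in_str
    if (c == '\n') && in_str then
      (s.take i ++ ';' :: ' ' :: s.drop (i + 1), in_str)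
    else (s, in_str)

def remove_nl (output : String) : String :=
  let cs := output.toList
  let r := (List.range cs.length).foldl stepA_remove (cs, false)
  String.mk r.1

-- ===== PORT B =====
-- Source B's parts list of strings (each '; ' or a single char), joined at the end, is
-- ported as a List Char accumulator to which each append adds [';', ' '] or [c].
def stepB_remove (st : List Char × Bool) (c : Char) : List Char × Bool :=
  let in_str := if c == '"' then !st.2 else st.2
  if (c == '\n') && in_str then (st.1 ++ [';', ' '], in_str)
  else (st.1 ++ [c], in_str)

def remove_nl_alt (output : String) : String :=
  String.mk (output.toList.foldl stepB_remove ([], false)).1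

-- ===== PRECONDITION & SPEC =====
-- On strings where some in-string newline at position j has j + (number of earlier
-- in-string newlines) >= len, A's fixed-length index loop never reaches that newline
-- (each "; " insertion shifts the tail right by one) and returns it unreplaced,
-- while B replaces every in-string newline with '; ', the function's evident intent.
def dscan_remove : List Char → Nat → Nat → Bool → Nat → Bool
  | [], _, _, _, _ => false
  | c :: rest, j, r, b, n =>
    let b' := if c == '"' then !b else b
    if (c == '\n') && b' then
      if n ≤ j + r then true
      else dscan_remove rest (j + 1) (r + 1) b' n
    else dscan_remove rest (j + 1) r b' n

def D_remove_nl (output : String) : Prop :=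
  dscan_remove output.toList 0 0 false output.toList.length = true
instance (output : String) : Decidable (D_remove_nl output) := by unfold D_remove_nl; infer_instance

def Spec_remove_nl (output : String) (out : String) : Prop := ¬ D_remove_nl output → out = remove_nl_alt output
instance (output : String) (out : String) : Decidable (Spec_remove_nl output out) := by unfold Spec_remove_nl; infer_instance

def pvDiffWitness_remove_nl : String := "\"\n\n"
def pvDiffWitnessOut_remove_nl : String × String := ("\"; \n", "\"; ; ")

-- ===== CLAIM (what is proved, stated in full; the proofs are below) =====
def Claim_unchanged_remove_nl : Prop := ∀ (output : String), Dom_remove_nl output → Spec_remove_nl output (remove_nl output)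
def Claim_exact_remove_nl : Prop := ∀ (output : String), Dom_remove_nl output → D_remove_nl output → remove_nl output ≠ remove_nl_alt output
def Claim_changed_remove_nl : Prop := Dom_remove_nl (pvDiffWitness_remove_nl) ∧ D_remove_nl (pvDiffWitness_remove_nl) ∧ remove_nl (pvDiffWitness_remove_nl) = pvDiffWitnessOut_remove_nl.1 ∧ remove_nl_alt (pvDiffWitness_remove_nl) = pvDiffWitnessOut_remove_nl.2 ∧ pvDiffWitnessOut_remove_nl.1 ≠ pvDiffWitnessOut_remove_nl.2

-- ===== LEMMAS AND PROOFS =====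

-- Proof-side model of A: the unread suffix of A's evolving string as a stack
-- (top = head); a replaced newline emits ';' and pushes back the inserted ' '.
def stepS_remove (st : List Char × List Char × Bool) (_i : Nat) :
    List Char × List Char × Bool :=
  let res := st.1
  let stack := st.2.1
  let in_str := st.2.2
  match stack with
  | [] => (res, [], in_str)
  | c :: rest =>
    let in_str := if c == '"' then !in_str else in_str
    if (c == '\n') && in_str then (res ++ [';'], ' ' :: rest, in_str)
    else (res ++ [c], rest, in_str)

-- The characters B emits from remaining input d in quote-state b.
def natAcc_remove : List Char → Bool → List Char
  | [], _ => []
  | c :: rest, b =>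
    let b' := if c == '"' then !b else b
    if (c == '\n') && b' then ';' :: ' ' :: natAcc_remove rest b'
    else c :: natAcc_remove rest b'

lemma foldl_stepB_acc : ∀ (d : List Char) (acc : List Char) (b : Bool),
    (d.foldl stepB_remove (acc, b)).1 = acc ++ natAcc_remove d b := by
  intro d
  induction d with
  | nil => intro acc b; simp [natAcc_remove]
  | cons c rest ih =>
    intro acc b
    simp only [List.foldl_cons, stepB_remove, natAcc_remove]
    by_cases h : ((c == '\n') && (if c == '"' then !b else b)) = true
    · rw [if_pos h, if_pos h, ih]; simp
    · rw [if_neg h, if_neg h, ih]; simp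

-- Invariant: after processing indices < k, A's string is res ++ stack, A's index k is
-- res.length, and the remaining m indices are covered by the stack (m ≤ stack.length).
lemma remove_nl_inv (m : Nat) : ∀ (k : Nat) (res d : List Char) (b : Bool),
    res.length = k → m ≤ d.length →
    (List.range' k m).foldl stepA_remove (res ++ d, b) =
      (((List.range' k m).foldl stepS_remove (res, d, b)).1
         ++ ((List.range' k m).foldl stepS_remove (res, d, b)).2.1,
       ((List.range' k m).foldl stepS_remove (res, d, b)).2.2) := by
  induction m with
  | zero => intro k res d b hk hm; simp
  | succ m ih =>
    intro k res d b hk hm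
    obtain ⟨c, rest, rfl⟩ : ∃ c rest, d = c :: rest := by
      cases d with
      | nil => simp at hm
      | cons c rest => exact ⟨c, rest, rfl⟩
    rw [List.range'_succ]
    simp only [List.foldl_cons]
    have hget : (res ++ c :: rest)[k]? = some c := by
      rw [← hk]; simp
    have htake : (res ++ c :: rest).take k = res := by
      rw [← hk]; exact List.take_left (l₁ := res)
    have hdrop : (res ++ c :: rest).drop (k + 1) = rest := by
      have h1 : res ++ c :: rest = (res ++ [c]) ++ rest := by simp
      have h2 : (res ++ [c]).length = k + 1 := by simp [hk]
      rw [h1, ← h2]; exact List.drop_left (l₁ := res ++ [c])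
    have hrest : m ≤ rest.length := by simpa using Nat.le_of_succ_le_succ hm
    by_cases hcond : ((c == '\n') && (if c == '"' then !b else b)) = true
    · have hA : stepA_remove (res ++ c :: rest, b) k
          = (res ++ ';' :: ' ' :: rest, if c == '"' then !b else b) := by
        simp only [stepA_remove, hget]
        rw [if_pos hcond, htake, hdrop]
      have hB : stepS_remove (res, c :: rest, b) k
          = (res ++ [';'], ' ' :: rest, if c == '"' then !b else b) := by
        simp only [stepS_remove]
        rw [if_pos hcond]
      rw [hA, hB]
      have := ih (k + 1) (res ++ [';']) (' ' :: rest) (if c == '"' then !b else b)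
        (by simp [hk]) (by simpa using Nat.le_succ_of_le hrest)
      simpa using this
    · have hA : stepA_remove (res ++ c :: rest, b) k
          = (res ++ c :: rest, if c == '"' then !b else b) := by
        simp only [stepA_remove, hget]
        rw [if_neg hcond]
      have hB : stepS_remove (res, c :: rest, b) k
          = (res ++ [c], rest, if c == '"' then !b else b) := by
        simp only [stepS_remove]
        rw [if_neg hcond]
      rw [hA, hB]
      have := ih (k + 1) (res ++ [c]) rest (if c == '"' then !b else b)
        (by simp [hk]) hrest
      simpa using this

-- A's result for remaining input d with position j, prior replacements r and budget n:
-- processed like B while the index budget lasts, then the raw unexamined tail.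
def procRaw_remove : List Char → Nat → Nat → Bool → Nat → List Char
  | [], _, _, _, _ => []
  | c :: rest, j, r, b, n =>
    if n ≤ j + r then c :: rest
    else
      let b' := if c == '"' then !b else b
      if (c == '\n') && b' then ';' :: ' ' :: procRaw_remove rest (j + 1) (r + 1) b' n
      else c :: procRaw_remove rest (j + 1) r b' n

lemma procRaw_of_le (d : List Char) (j r : Nat) (b : Bool) (n : Nat) (h : n ≤ j + r) :
    procRaw_remove d j r b n = d := by
  cases d with
  | nil => rfl
  | cons c rest => simp only [procRaw_remove]; rw [if_pos h]

lemma stepS_nil : ∀ (m k : Nat) (res : List Char) (b : Bool),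
    (List.range' k m).foldl stepS_remove (res, [], b) = (res, [], b) := by
  intro m
  induction m with
  | zero => intro k res b; simp
  | succ m ih =>
    intro k res b
    rw [List.range'_succ, List.foldl_cons]
    exact ih (k + 1) res b

-- The stack simulation of A over its n-step budget produces exactly res ++ procRaw.
lemma sim_eq_proc (n : Nat) : ∀ (d : List Char) (j r : Nat) (b : Bool) (res : List Char) (k : Nat),
    ((List.range' k (n - (j + r))).foldl stepS_remove (res, d, b)).1
      ++ ((List.range' k (n - (j + r))).foldl stepS_remove (res, d, b)).2.1
    = res ++ procRaw_remove d j r b n := by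
  intro d
  induction d with
  | nil =>
    intro j r b res k
    rw [stepS_nil]
    simp [procRaw_remove]
  | cons c rest ih =>
    intro j r b res k
    rcases hm : n - (j + r) with _ | m'
    · have hle : n ≤ j + r := by omega
      simp [procRaw_of_le _ _ _ _ _ hle]
    · have hle : ¬ n ≤ j + r := by omega
      rw [List.range'_succ]
      simp only [List.foldl_cons]
      simp only [procRaw_remove]
      rw [if_neg hle]
      by_cases h : ((c == '\n') && (if c == '"' then !b else b)) = true
      · rw [if_pos h]
        have hstep : stepS_remove (res, c :: rest, b) k
            = (res ++ [';'], ' ' :: rest, if c == '"' then !b else b) := by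
          simp only [stepS_remove]; rw [if_pos h]
        rw [hstep]
        rcases hm' : m' with _ | m''
        · -- budget ends right after the replacement: ' ' and the rest stay unread
          simp only [List.range'_zero, List.foldl_nil]
          rw [procRaw_of_le rest (j + 1) (r + 1) _ n (by omega)]
          simp
        · -- next step consumes the pushed ' '
          rw [List.range'_succ]
          simp only [List.foldl_cons]
          have hsp : stepS_remove (res ++ [';'], ' ' :: rest, if c == '"' then !b else b) (k + 1)
              = (res ++ [';', ' '], rest, if c == '"' then !b else b) := by
            simp [stepS_remove]
          rw [hsp]
          have hrec := ih (j + 1) (r + 1) (if c == '"' then !b else b) (res ++ [';', ' ']) (k + 2)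
          have hmm : n - (j + 1 + (r + 1)) = m'' := by omega
          rw [hmm] at hrec
          rw [hrec]
          simp
      · rw [if_neg h]
        have hstep : stepS_remove (res, c :: rest, b) k
            = (res ++ [c], rest, if c == '"' then !b else b) := by
          simp only [stepS_remove]; rw [if_neg h]
        rw [hstep]
        have hrec := ih (j + 1) r (if c == '"' then !b else b) (res ++ [c]) (k + 1)
        have hmm : n - (j + 1 + r) = m' := by omega
        rw [hmm] at hrec
        rw [hrec]
        simp

-- Unexamined tail, outside D_: past the budget (n ≤ j + r) B emits it verbatim.
lemma natAcc_id : ∀ (d : List Char) (j r : Nat) (b : Bool) (n : Nat),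
    dscan_remove d j r b n = false → n ≤ j + r → natAcc_remove d b = d := by
  intro d
  induction d with
  | nil => intro j r b n _ _; simp [natAcc_remove]
  | cons c rest ih =>
    intro j r b n hd hn
    simp only [dscan_remove] at hd
    simp only [natAcc_remove]
    by_cases h : ((c == '\n') && (if c == '"' then !b else b)) = true
    · rw [if_pos h, if_pos (by omega : n ≤ j + r)] at hd
      exact absurd hd (by simp)
    · rw [if_neg h] at hd
      rw [if_neg h, ih (j + 1) r _ n hd (by omega)]

-- Outside D_, A's processed-then-raw result coincides with B's full pass.
lemma proc_eq_nat : ∀ (d : List Char) (j r : Nat) (b : Bool) (n : Nat),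
    dscan_remove d j r b n = false → procRaw_remove d j r b n = natAcc_remove d b := by
  intro d
  induction d with
  | nil => intro j r b n _; rfl
  | cons c rest ih =>
    intro j r b n hd
    simp only [dscan_remove] at hd
    simp only [procRaw_remove, natAcc_remove]
    by_cases hle : n ≤ j + r
    · rw [if_pos hle]
      by_cases h : ((c == '\n') && (if c == '"' then !b else b)) = true
      · rw [if_pos h, if_pos (by omega : n ≤ j + r)] at hd
        exact absurd hd (by simp)
      · rw [if_neg h] at hd
        rw [if_neg h, natAcc_id rest (j + 1) r _ n hd (by omega)]
    · rw [if_neg hle]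
      by_cases h : ((c == '\n') && (if c == '"' then !b else b)) = true
      · rw [if_pos h, if_neg hle] at hd
        rw [if_pos h, ih (j + 1) (r + 1) _ n hd, if_pos h]
      · rw [if_neg h] at hd
        rw [if_neg h, ih (j + 1) r _ n hd, if_neg h]

-- Inside D_ and past the budget, the raw tail contains an in-string newline B replaces.
lemma natAcc_ne_raw : ∀ (d : List Char) (j r : Nat) (b : Bool) (n : Nat),
    dscan_remove d j r b n = true → n ≤ j + r → natAcc_remove d b ≠ d := by
  intro d
  induction d with
  | nil => intro j r b n hd _; simp [dscan_remove] at hd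
  | cons c rest ih =>
    intro j r b n hd hn
    simp only [dscan_remove] at hd
    simp only [natAcc_remove]
    by_cases h : ((c == '\n') && (if c == '"' then !b else b)) = true
    · rw [if_pos h]
      intro heq
      have hc : c = '\n' := by
        have := (Bool.and_eq_true _ _).mp h |>.1
        exact beq_iff_eq.mp this
      have : ';' = c := (List.cons_eq_cons.mp heq).1
      rw [hc] at this
      exact absurd this (by decide)
    · rw [if_neg h] at hd
      rw [if_neg h]
      intro heq
      exact ih (j + 1) r _ n hd (by omega) (List.cons_eq_cons.mp heq).2

-- Inside D_, A's result differs from B's.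
lemma proc_ne_nat : ∀ (d : List Char) (j r : Nat) (b : Bool) (n : Nat),
    dscan_remove d j r b n = true → procRaw_remove d j r b n ≠ natAcc_remove d b := by
  intro d
  induction d with
  | nil => intro j r b n hd; simp [dscan_remove] at hd
  | cons c rest ih =>
    intro j r b n hd
    simp only [dscan_remove] at hd
    simp only [procRaw_remove]
    by_cases hle : n ≤ j + r
    · rw [if_pos hle]
      exact fun heq => natAcc_ne_raw (c :: rest) j r b n hd hle heq.symm
    · rw [if_neg hle]
      simp only [natAcc_remove]
      by_cases h : ((c == '\n') && (if c == '"' then !b else b)) = true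
      · rw [if_pos h, if_neg hle] at hd
        rw [if_pos h, if_pos h]
        intro heq
        exact ih (j + 1) (r + 1) _ n hd (List.cons_eq_cons.mp (List.cons_eq_cons.mp heq).2).2
      · rw [if_neg h] at hd
        rw [if_neg h, if_neg h]
        intro heq
        exact ih (j + 1) r _ n hd (List.cons_eq_cons.mp heq).2

lemma toList_mk_remove (l : List Char) : (String.mk l).toList = l := (String.ofList_eq.mp rfl).symm

-- A's result, as a character list.
lemma remove_nl_chars (output : String) :
    (remove_nl output).toList = procRaw_remove output.toList 0 0 false output.toList.length := by
  simp only [remove_nl, List.range_eq_range']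
  have h1 := remove_nl_inv output.toList.length 0 [] output.toList false rfl (Nat.le_refl _)
  rw [List.nil_append] at h1
  have h2 := sim_eq_proc output.toList.length output.toList 0 0 false [] 0
  simp only [Nat.sub_zero, Nat.add_zero, List.nil_append] at h2
  rw [h1, toList_mk_remove]
  exact h2

-- B's result, as a character list.
lemma remove_nl_alt_chars (output : String) :
    (remove_nl_alt output).toList = natAcc_remove output.toList false := by
  simp only [remove_nl_alt]
  rw [toList_mk_remove, foldl_stepB_acc]
  simp

-- ===== VERDICT (by name: the statements are the Claim_ definitions above) =====
theorem remove_nl_spec : Claim_unchanged_remove_nl := by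
  intro output _
  unfold Spec_remove_nl
  intro hD
  unfold D_remove_nl at hD
  rw [Bool.not_eq_true] at hD
  have ha := remove_nl_chars output
  rw [proc_eq_nat _ _ _ _ _ hD, ← remove_nl_alt_chars] at ha
  exact String.toList_inj.mp ha

theorem remove_nl_changed : Claim_changed_remove_nl := by
  unfold Claim_changed_remove_nl; decide

theorem remove_nl_tight : Claim_exact_remove_nl := by
  intro output _ hD heq
  unfold D_remove_nl at hD
  have ha := remove_nl_chars output
  rw [heq, remove_nl_alt_chars] at ha
  exact proc_ne_nat _ _ _ _ _ hD ha.symm
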